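-- pv_equiv track=rewrite | github.com/aliu39/112-Spelunky-Term-Project | code/world.py | removeDiagonalsStep
-- ===== SOURCE A (Python) =====
-- import copy
--
-- def adjacentSpace(oldMap,row,col):
--     dirPairs = [(-1,0,0,1), (1,0,0,1), (1,0,0,-1), (-1,0,0,-1)]
--     for (i1,j1,i2,j2) in dirPairs:
--         count = 0
--         neighbor_row1 = row+i1
--         neighbor_col1 = col+j1
--         #off map counts as alive
--         if(neighbor_row1 < 0 or neighbor_col1 < 0 or neighbor_row1 >= len(oldMap) or neighbor_col1 >= len(oldMap[0])):
--             pass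
--         elif(oldMap[neighbor_row1][neighbor_col1] == 0):
--             count += 1
--
--         neighbor_row2 = row+i2
--         neighbor_col2 = col+j2
--         #off map counts as alive
--         if(neighbor_row2 < 0 or neighbor_col2 < 0 or neighbor_row2 >= len(oldMap) or neighbor_col2 >= len(oldMap[0])):
--             pass
--         elif(oldMap[neighbor_row2][neighbor_col2] == 0):
--             count += 1
--
--         if count == 2: return True
--
--     return False
--
-- def removeDiagonalsStep(oldMap):
--     newMap = copy.deepcopy(oldMap)
--     for row in range(len(oldMap)):
--         for col in range(len(oldMap[0])):
--             if oldMap[row][col] == 1: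
--                 if adjacentSpace(oldMap,row,col):
--                     newMap[row][col] = 0
--     return newMap
-- ===== SOURCE B (Python) =====
-- def removeDiagonalsStep(oldMap):
--     h = len(oldMap)
--     w = len(oldMap[0]) if oldMap else 0
--     zeros = [(i, j) for i in range(h) for j in range(w) if oldMap[i][j] == 0]
--     vert = {(i + d, j) for (i, j) in zeros for d in (-1, 1)}
--     horiz = {(i, j + d) for (i, j) in zeros for d in (-1, 1)}
--     newMap = [list(row) for row in oldMap]
--     for (i, j) in vert & horiz:
--         if 0 <= i < h and 0 <= j < w and oldMap[i][j] == 1: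
--             newMap[i][j] = 0
--     return newMap
-- ===== Notes on version B (the rewrite author's own statement) =====
-- stated objective: alternative
-- what changed: Instead of probing four neighbour pairs from every 1-cell, B scatters from the open cells: it collects all zero positions, builds the sets of positions having an open vertical neighbour and an open horizontal neighbour, and zeroes the 1-cells in the intersection of the two sets on a fresh copy; Pre_ excludes grids with a row shorter than the first row, on which A (and B) raise IndexError.
import Mathlib
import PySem

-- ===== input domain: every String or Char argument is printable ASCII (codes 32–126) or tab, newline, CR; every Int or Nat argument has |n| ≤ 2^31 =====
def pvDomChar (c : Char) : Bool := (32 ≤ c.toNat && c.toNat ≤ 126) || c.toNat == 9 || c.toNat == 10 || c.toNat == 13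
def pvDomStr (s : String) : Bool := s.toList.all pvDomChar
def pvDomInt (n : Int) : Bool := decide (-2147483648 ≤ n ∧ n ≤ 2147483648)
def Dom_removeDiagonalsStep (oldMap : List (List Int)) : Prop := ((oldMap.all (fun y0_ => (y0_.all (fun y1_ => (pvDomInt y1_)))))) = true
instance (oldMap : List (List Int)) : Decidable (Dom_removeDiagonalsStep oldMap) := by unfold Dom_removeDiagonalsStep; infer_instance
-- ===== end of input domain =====

-- B replaces A's per-1-cell probing of four direction pairs by a scatter from the open
-- cells: it builds the sets of positions with an open vertical / horizontal neighbour and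
-- zeroes the 1-cells in their intersection on a fresh copy; objective: alternative algorithm.

-- ===== PORT A =====
-- one neighbour probe of adjacentSpace: off-map counts as not-open, else open iff the cell is 0
def pvNbOpen (oldMap : List (List Int)) (r c : Int) : Bool :=
  if r < 0 || c < 0 || r ≥ (oldMap.length : Int) || c ≥ ((oldMap.headD []).length : Int) then
    false
  else
    (oldMap.getD r.toNat []).getD c.toNat 0 == 0

def adjacentSpace (oldMap : List (List Int)) (row col : Int) : Bool :=
  [((-1:Int),(0:Int),(0:Int),(1:Int)), (1,0,0,1), (1,0,0,-1), (-1,0,0,-1)].any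
    (fun p =>
      ((if pvNbOpen oldMap (row + p.1) (col + p.2.1) then (1:Int) else 0)
        + (if pvNbOpen oldMap (row + p.2.2.1) (col + p.2.2.2) then 1 else 0)) == 2)

def removeDiagonalsStep (oldMap : List (List Int)) : List (List Int) :=
  (PySem.List.pyRange 0 (oldMap.length : Int) 1).foldl (fun newMap row =>
    (PySem.List.pyRange 0 ((oldMap.headD []).length : Int) 1).foldl (fun newMap col =>
      if (oldMap.getD row.toNat []).getD col.toNat 0 == 1 then
        if adjacentSpace oldMap row col then
          newMap.modify row.toNat (fun l => l.set col.toNat 0)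
        else newMap
      else newMap) newMap) oldMap

-- ===== PORT B =====
-- Source B: collect zero positions, scatter them into the 'vert' and 'horiz' sets, then zero
-- the valid 1-cells of the intersection on a fresh copy (a Python set is PySem.Set; the
-- removal loop's result does not depend on the set's iteration order).
def removeDiagonalsStep_alt (oldMap : List (List Int)) : List (List Int) :=
  let h : Int := (oldMap.length : Int)
  let w : Int := if oldMap.isEmpty then 0 else ((oldMap.headD []).length : Int)
  let zeros : List (Int × Int) :=
    (PySem.List.pyRange 0 h 1).flatMap (fun i =>
      ((PySem.List.pyRange 0 w 1).filter
        (fun j => (oldMap.getD i.toNat []).getD j.toNat 0 == 0)).map (fun j => (i, j)))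
  let vert : PySem.Set (Int × Int) :=
    PySem.Set.ofList (zeros.flatMap (fun p => [(-1 : Int), 1].map (fun d => (p.1 + d, p.2))))
  let horiz : PySem.Set (Int × Int) :=
    PySem.Set.ofList (zeros.flatMap (fun p => [(-1 : Int), 1].map (fun d => (p.1, p.2 + d))))
  let newMap : List (List Int) := oldMap.map (fun row => row)
  (PySem.Set.inter vert horiz).foldl (fun m p =>
    if (0 ≤ p.1 && p.1 < h) && (0 ≤ p.2 && p.2 < w)
        && ((oldMap.getD p.1.toNat []).getD p.2.toNat 0 == 1)
    then m.modify p.1.toNat (fun l => l.set p.2.toNat 0) else m) newMap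

-- ===== PRECONDITION & SPEC =====
-- Python A raises IndexError exactly when some row is shorter than the first row
-- (it indexes every row at columns 0..len(oldMap[0])-1); Pre_ admits every input A returns on.
def Pre_removeDiagonalsStep (oldMap : List (List Int)) : Prop :=
  ∀ row ∈ oldMap, (oldMap.headD []).length ≤ row.length
instance (oldMap : List (List Int)) : Decidable (Pre_removeDiagonalsStep oldMap) := by unfold Pre_removeDiagonalsStep; infer_instance
def pvWitness_removeDiagonalsStep : List (List Int) := [[1, 1, 0], [0, 1, 1], [1, 0, 1]]

def Spec_removeDiagonalsStep (oldMap : List (List Int)) (out : List (List Int)) : Prop := out = removeDiagonalsStep_alt oldMap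
instance (oldMap : List (List Int)) (out : List (List Int)) : Decidable (Spec_removeDiagonalsStep oldMap out) := by unfold Spec_removeDiagonalsStep; infer_instance

-- ===== CLAIM (what is proved, stated in full; the proofs are below) =====
def Claim_equal_removeDiagonalsStep : Prop := ∀ (oldMap : List (List Int)), Dom_removeDiagonalsStep oldMap → Pre_removeDiagonalsStep oldMap → Spec_removeDiagonalsStep oldMap (removeDiagonalsStep oldMap)

-- ===== LEMMAS AND PROOFS =====

-- proof-side neighbour test: in-bounds and the cell is 0
def pvIsOpen (oldMap : List (List Int)) (h w : Int) (i j : Int) : Bool :=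
  (0 ≤ i && i < h) && (0 ≤ j && j < w) && ((oldMap.getD i.toNat []).getD j.toNat 0 == 0)

-- the two neighbour tests are the same boolean
lemma nbOpen_eq_isOpen (oldMap : List (List Int)) (r c : Int) :
    pvNbOpen oldMap r c
      = pvIsOpen oldMap (oldMap.length : Int) ((oldMap.headD []).length : Int) r c := by
  unfold pvNbOpen pvIsOpen
  split_ifs with hg
  · simp only [Bool.or_eq_true, decide_eq_true_eq, ge_iff_le] at hg
    symm
    simp only [Bool.and_eq_true, decide_eq_true_eq, Bool.eq_false_iff, ne_eq]
    intro ⟨⟨⟨a1, a2⟩, b1, b2⟩, _⟩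
    omega
  · simp only [Bool.or_eq_true, decide_eq_true_eq, ge_iff_le, not_or, not_lt, not_le] at hg
    have h1 : 0 ≤ r := by omega
    have h2 : r < (oldMap.length : Int) := by omega
    have h3 : 0 ≤ c := by omega
    have h4 : c < ((oldMap.headD []).length : Int) := by omega
    simp only [List.headD_eq_head?_getD] at h4
    simp [h1, h2, h3, h4]

-- A's dirPairs scan is the corner condition (up-or-down open) and (left-or-right open)
lemma adjacentSpace_eq (oldMap : List (List Int)) (r c : Int) :
    adjacentSpace oldMap r c
      = ((pvIsOpen oldMap (oldMap.length : Int) ((oldMap.headD []).length : Int) (r - 1) c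
            || pvIsOpen oldMap (oldMap.length : Int) ((oldMap.headD []).length : Int) (r + 1) c)
          && (pvIsOpen oldMap (oldMap.length : Int) ((oldMap.headD []).length : Int) r (c - 1)
            || pvIsOpen oldMap (oldMap.length : Int) ((oldMap.headD []).length : Int) r (c + 1))) := by
  unfold adjacentSpace
  simp only [List.any_cons, List.any_nil, nbOpen_eq_isOpen]
  have e1 : r + (-1 : Int) = r - 1 := by ring
  have e2 : c + (-1 : Int) = c - 1 := by ring
  have e0r : r + (0 : Int) = r := by ring
  have e0c : c + (0 : Int) = c := by ring
  rw [e1, e2, e0r, e0c]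
  generalize pvIsOpen oldMap (oldMap.length : Int) ((oldMap.headD []).length : Int) (r - 1) c = u
  generalize pvIsOpen oldMap (oldMap.length : Int) ((oldMap.headD []).length : Int) (r + 1) c = d
  generalize pvIsOpen oldMap (oldMap.length : Int) ((oldMap.headD []).length : Int) r (c - 1) = lf
  generalize pvIsOpen oldMap (oldMap.length : Int) ((oldMap.headD []).length : Int) r (c + 1) = rt
  cases u <;> cases d <;> cases lf <;> cases rt <;> decide

-- a grid-level column loop that only modifies row r is the row transform applied once at r
lemma colfold_modify (cols : List Int) (r : Nat) (f : Int → Bool) (m : List (List Int)) :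
    cols.foldl (fun m c => if f c then m.modify r (fun l => l.set c.toNat 0) else m) m
      = m.modify r (fun l => cols.foldl (fun l c => if f c then l.set c.toNat 0 else l) l) := by
  induction cols generalizing m with
  | nil => exact (List.modify_id r m).symm
  | cons c cs ih =>
    simp only [List.foldl_cons]
    by_cases hc : f c
    · simp only [hc, if_true, ih, List.modify_modify_eq]
      rfl
    · simp [hc, ih]

-- pointwise effect of the row transform
lemma rowfold_getElem? (cols : List Int) (hc : ∀ c ∈ cols, 0 ≤ c) (f : Int → Bool)
    (l : List Int) (j : Nat) :
    (cols.foldl (fun l c => if f c then l.set c.toNat 0 else l) l)[j]?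
      = l[j]?.map (fun v => if (j : Int) ∈ cols ∧ f (j : Int) then 0 else v) := by
  induction cols generalizing l with
  | nil => simp
  | cons c cs ih =>
    have hc0 : 0 ≤ c := hc c (by simp)
    have hcs : ∀ x ∈ cs, 0 ≤ x := fun x hx => hc x (by simp [hx])
    simp only [List.foldl_cons]
    rw [ih hcs]
    have hstep : (if f c then l.set c.toNat 0 else l)[j]?
        = l[j]?.map (fun v => if c = (j : Int) ∧ f c then 0 else v) := by
      by_cases hf : f c
      · simp only [hf, if_true, List.getElem?_set]
        by_cases hcj : c.toNat = j
        · have hcj' : c = (j : Int) := by omega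
          by_cases hj : j < l.length
          · rw [List.getElem?_eq_getElem hj]; simp [hj, hcj']
          · rw [List.getElem?_eq_none (by omega)]; simp [hcj, hj]
        · have hcj' : ¬ c = (j : Int) := by omega
          cases hl : l[j]? <;> simp [hcj, hcj']
      · cases hl : l[j]? <;> simp [hf, hl]
    rw [hstep]
    cases hl : l[j]? with
    | none => simp
    | some v =>
      simp only [Option.map_some, List.mem_cons]
      by_cases h2 : c = (j : Int)
      · subst h2
        by_cases h1 : f (j : Int) <;> by_cases h3 : (j : Int) ∈ cs <;>
          simp [h1, h3]
      · have h2' : ¬ ((j : Int) = c) := fun h => h2 h.symm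
        by_cases h1 : f (j : Int) <;> by_cases h3 : (j : Int) ∈ cs <;>
          simp [h1, h2, h2', h3]

-- pointwise effect of the row loop (distinct nonnegative row indices)
lemma outfold_getElem? (rows : List Int) (hn : rows.Nodup) (hp : ∀ r ∈ rows, 0 ≤ r)
    (F : Int → List Int → List Int) (m : List (List Int)) (i : Nat) :
    (rows.foldl (fun m r => m.modify r.toNat (F r)) m)[i]?
      = if (i : Int) ∈ rows then m[i]?.map (F (i : Int)) else m[i]? := by
  induction rows generalizing m with
  | nil => simp
  | cons r rs ih =>
    have hr0 : 0 ≤ r := hp r (by simp)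
    have hrs : ∀ x ∈ rs, 0 ≤ x := fun x hx => hp x (by simp [hx])
    simp only [List.foldl_cons]
    rw [ih hn.of_cons hrs]
    by_cases hri : r = (i : Int)
    · have hnotin : (i : Int) ∉ rs := by rw [← hri]; exact (List.nodup_cons.mp hn).1
      have ht : r.toNat = i := by omega
      simp only [hnotin, if_false, List.getElem?_modify, List.mem_cons, hri]
      cases m[i]? <;> simp
    · have hne : r.toNat ≠ i := by omega
      have hir : ¬ (i : Int) = r := fun h => hri h.symm
      simp only [List.getElem?_modify, if_neg hne, List.mem_cons]
      by_cases hmem : (i : Int) ∈ rs <;> simp [hmem, hir]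

-- B's removal loop, restricted to one row: the i-th row of the fold is the row fold of the hits at i
lemma remfold_getElem? (ps : List (Int × Int)) (f : Int × Int → Bool)
    (m : List (List Int)) (i : Nat) :
    (ps.foldl (fun m p => if f p then m.modify p.1.toNat (fun l => l.set p.2.toNat 0) else m) m)[i]?
      = m[i]?.map (fun l => ps.foldl
          (fun l p => if f p && (p.1.toNat == i) then l.set p.2.toNat 0 else l) l) := by
  induction ps generalizing m with
  | nil => cases h : m[i]? <;> simp [h]
  | cons p ps ih =>
    simp only [List.foldl_cons]
    rw [ih]
    by_cases hf : f p
    · simp only [hf, Bool.true_and]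
      by_cases hpi : p.1.toNat = i
      · simp only [List.getElem?_modify, hpi, beq_self_eq_true, if_true]
        cases h : m[i]? <;> simp
      · have : (p.1.toNat == i) = false := by simp [hpi]
        simp [hpi, this]
    · have : (f p && (p.1.toNat == i)) = false := by simp [hf]
      simp [hf]

-- pointwise effect of B's per-row removal fold
lemma remrow_getElem? (ps : List (Int × Int)) (c : Int × Int → Bool) (l : List Int) (j : Nat) :
    (ps.foldl (fun l p => if c p then l.set p.2.toNat 0 else l) l)[j]?
      = l[j]?.map (fun v => if ps.any (fun p => c p && (p.2.toNat == j)) then 0 else v) := by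
  induction ps generalizing l with
  | nil => cases h : l[j]? <;> simp [h]
  | cons p ps ih =>
    simp only [List.foldl_cons, List.any_cons]
    rw [ih]
    have hstep : (if c p then l.set p.2.toNat 0 else l)[j]?
        = l[j]?.map (fun v => if c p && (p.2.toNat == j) then 0 else v) := by
      by_cases hc : c p
      · simp only [hc, if_true, Bool.true_and, List.getElem?_set]
        by_cases hpj : p.2.toNat = j
        · by_cases hl : j < l.length
          · rw [List.getElem?_eq_getElem hl]; simp [hpj, hl]
          · rw [List.getElem?_eq_none (by omega)]; simp [hpj, hl]
        · have hb : (p.2.toNat == j) = false := by simp [hpj]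
          cases hl : l[j]? <;> simp [hpj, hb]
      · rw [if_neg hc]
        have hb : (c p && (p.2.toNat == j)) = false := by simp [hc]
        rw [hb]
        cases hl : l[j]? <;> simp
    rw [hstep]
    cases hl : l[j]? with
    | none => simp
    | some v =>
      simp only [Option.map_some]
      by_cases h1 : c p <;> by_cases h2 : p.2.toNat = j <;>
        by_cases h3 : (ps.any fun q => c q && q.2.toNat == j) = true <;>
        simp [h1, h2, h3]

-- boolean neighbour test, unpacked
lemma isOpen_iff (M : List (List Int)) (h w i j : Int) :
    pvIsOpen M h w i j = true ↔
      (0 ≤ i ∧ i < h ∧ 0 ≤ j ∧ j < w ∧ (M.getD i.toNat []).getD j.toNat 0 = 0) := by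
  unfold pvIsOpen
  simp only [Bool.and_eq_true, decide_eq_true_eq, beq_iff_eq]
  tauto

-- the list of zero positions B scans (proof-side name for the expression in the port)
def pvZeros (M : List (List Int)) : List (Int × Int) :=
  (PySem.List.pyRange 0 (M.length : Int) 1).flatMap (fun i =>
    ((PySem.List.pyRange 0 ((M.headD []).length : Int) 1).filter
      (fun j => (M.getD i.toNat []).getD j.toNat 0 == 0)).map (fun j => (i, j)))

lemma mem_zeros_iff (M : List (List Int)) (a b : Int) :
    ((a, b) ∈ pvZeros M) ↔
      pvIsOpen M (M.length : Int) ((M.headD []).length : Int) a b = true := by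
  rw [isOpen_iff]
  unfold pvZeros
  constructor
  · intro hm
    obtain ⟨i, hi, hm2⟩ := List.mem_flatMap.mp hm
    obtain ⟨j, hj, hje⟩ := List.mem_map.mp hm2
    obtain ⟨hjr, hz⟩ := List.mem_filter.mp hj
    obtain ⟨hi0, hiH⟩ := PySem.List.mem_pyRange_one.mp hi
    obtain ⟨hj0, hjW⟩ := PySem.List.mem_pyRange_one.mp hjr
    injection hje with h1 h2
    subst h1; subst h2
    exact ⟨hi0, hiH, hj0, hjW, by simpa using hz⟩
  · rintro ⟨h1, h2, h3, h4, h5⟩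
    exact List.mem_flatMap.mpr ⟨a, PySem.List.mem_pyRange_one.mpr ⟨h1, h2⟩,
      List.mem_map.mpr ⟨b, List.mem_filter.mpr
        ⟨PySem.List.mem_pyRange_one.mpr ⟨h3, h4⟩, by simpa using h5⟩, rfl⟩⟩

-- membership in B's 'vert' scatter list: some vertical neighbour is open
lemma mem_vert_iff (M : List (List Int)) (a b : Int) :
    ((a, b) ∈ (pvZeros M).flatMap (fun p => [(-1 : Int), 1].map (fun d => (p.1 + d, p.2)))) ↔
      (pvIsOpen M (M.length : Int) ((M.headD []).length : Int) (a - 1) b = true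
        ∨ pvIsOpen M (M.length : Int) ((M.headD []).length : Int) (a + 1) b = true) := by
  constructor
  · intro hm
    obtain ⟨p, hp, hm2⟩ := List.mem_flatMap.mp hm
    obtain ⟨d, hd, he⟩ := List.mem_map.mp hm2
    injection he with h1 h2
    have hz := (mem_zeros_iff M p.1 p.2).mp (by rwa [Prod.mk.eta])
    rw [isOpen_iff] at hz
    obtain ⟨hz1, hz2, hz3, hz4, hz5⟩ := hz
    have hd' : d = -1 ∨ d = 1 := by simpa using hd
    rcases hd' with rfl | rfl
    · right
      rw [isOpen_iff]
      refine ⟨by omega, by omega, by omega, by omega, ?_⟩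
      have e1 : (a + 1).toNat = p.1.toNat := by omega
      have e2 : b.toNat = p.2.toNat := by omega
      rw [e1, e2]; exact hz5
    · left
      rw [isOpen_iff]
      refine ⟨by omega, by omega, by omega, by omega, ?_⟩
      have e1 : (a - 1).toNat = p.1.toNat := by omega
      have e2 : b.toNat = p.2.toNat := by omega
      rw [e1, e2]; exact hz5
  · rintro (h | h)
    · exact List.mem_flatMap.mpr ⟨(a - 1, b), (mem_zeros_iff M _ _).mpr h,
        List.mem_map.mpr ⟨1, by simp, by simp⟩⟩
    · exact List.mem_flatMap.mpr ⟨(a + 1, b), (mem_zeros_iff M _ _).mpr h,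
        List.mem_map.mpr ⟨-1, by simp, by simp⟩⟩

-- membership in B's 'horiz' scatter list: some horizontal neighbour is open
lemma mem_horiz_iff (M : List (List Int)) (a b : Int) :
    ((a, b) ∈ (pvZeros M).flatMap (fun p => [(-1 : Int), 1].map (fun d => (p.1, p.2 + d)))) ↔
      (pvIsOpen M (M.length : Int) ((M.headD []).length : Int) a (b - 1) = true
        ∨ pvIsOpen M (M.length : Int) ((M.headD []).length : Int) a (b + 1) = true) := by
  constructor
  · intro hm
    obtain ⟨p, hp, hm2⟩ := List.mem_flatMap.mp hm
    obtain ⟨d, hd, he⟩ := List.mem_map.mp hm2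
    injection he with h1 h2
    have hz := (mem_zeros_iff M p.1 p.2).mp (by rwa [Prod.mk.eta])
    rw [isOpen_iff] at hz
    obtain ⟨hz1, hz2, hz3, hz4, hz5⟩ := hz
    have hd' : d = -1 ∨ d = 1 := by simpa using hd
    rcases hd' with rfl | rfl
    · right
      rw [isOpen_iff]
      refine ⟨by omega, by omega, by omega, by omega, ?_⟩
      have e1 : a.toNat = p.1.toNat := by omega
      have e2 : (b + 1).toNat = p.2.toNat := by omega
      rw [e1, e2]; exact hz5
    · left
      rw [isOpen_iff]
      refine ⟨by omega, by omega, by omega, by omega, ?_⟩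
      have e1 : a.toNat = p.1.toNat := by omega
      have e2 : (b - 1).toNat = p.2.toNat := by omega
      rw [e1, e2]; exact hz5
  · rintro (h | h)
    · exact List.mem_flatMap.mpr ⟨(a, b - 1), (mem_zeros_iff M _ _).mpr h,
        List.mem_map.mpr ⟨1, by simp, by simp⟩⟩
    · exact List.mem_flatMap.mpr ⟨(a, b + 1), (mem_zeros_iff M _ _).mpr h,
        List.mem_map.mpr ⟨-1, by simp, by simp⟩⟩

-- ===== VERDICT (by name: the statement is the Claim_ definition above) =====
theorem removeDiagonalsStep_spec : Claim_equal_removeDiagonalsStep := by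
  intro oldMap _ _
  unfold Spec_removeDiagonalsStep
  by_cases hnil : oldMap = []
  · subst hnil; decide
  · set H : Int := (oldMap.length : Int) with hH
    set W : Int := ((oldMap.headD []).length : Int) with hW
    -- A's per-cell removal test
    set g : Int → Int → Bool := fun r c =>
      ((oldMap.getD r.toNat []).getD c.toNat 0 == 1) && adjacentSpace oldMap r c with hg
    set F : Int → List Int → List Int := fun r l =>
      (PySem.List.pyRange 0 W 1).foldl (fun l c => if g r c then l.set c.toNat 0 else l) l with hF
    have hbody : ∀ (m : List (List Int)) (r : Int),
        (PySem.List.pyRange 0 W 1).foldl (fun newMap col =>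
          if (oldMap.getD r.toNat []).getD col.toNat 0 == 1 then
            if adjacentSpace oldMap r col then
              newMap.modify r.toNat (fun l => l.set col.toNat 0)
            else newMap
          else newMap) m
        = m.modify r.toNat (F r) := by
      intro m r
      have hfun : (fun (newMap : List (List Int)) col =>
          if (oldMap.getD r.toNat []).getD col.toNat 0 == 1 then
            if adjacentSpace oldMap r col then
              newMap.modify r.toNat (fun l => l.set col.toNat 0)
            else newMap
          else newMap)
          = (fun (newMap : List (List Int)) c =>
              if g r c then newMap.modify r.toNat (fun l => l.set c.toNat 0) else newMap) := by
        funext m' c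
        by_cases h1 : (oldMap.getD r.toNat []).getD c.toNat 0 == 1 <;>
          by_cases h2 : adjacentSpace oldMap r c <;> simp [hg, h2]
      rw [hfun, colfold_modify]
    have hA : ∀ i : Nat, (removeDiagonalsStep oldMap)[i]?
        = if (i : Int) ∈ PySem.List.pyRange 0 H 1
          then oldMap[i]?.map (F (i : Int)) else oldMap[i]? := by
      intro i
      unfold removeDiagonalsStep
      rw [← hW, ← hH]
      simp only [hbody]
      exact outfold_getElem? _ (PySem.List.nodup_pyRange_one _ _)
        (fun r hr => (PySem.List.mem_pyRange_one.mp hr).1) F oldMap i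
    -- the B side: unfold to a removal fold over the intersection, applied to oldMap
    have hBne : oldMap.isEmpty = false := by simp [hnil]
    have hBdef : removeDiagonalsStep_alt oldMap
        = (PySem.Set.inter
            (PySem.Set.ofList ((pvZeros oldMap).flatMap
              (fun p => [(-1 : Int), 1].map (fun d => (p.1 + d, p.2)))))
            (PySem.Set.ofList ((pvZeros oldMap).flatMap
              (fun p => [(-1 : Int), 1].map (fun d => (p.1, p.2 + d)))))).foldl
            (fun m p =>
              if (0 ≤ p.1 && p.1 < H) && (0 ≤ p.2 && p.2 < W)
                  && ((oldMap.getD p.1.toNat []).getD p.2.toNat 0 == 1)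
              then m.modify p.1.toNat (fun l => l.set p.2.toNat 0) else m)
            oldMap := by
      unfold removeDiagonalsStep_alt pvZeros
      simp only [hBne, Bool.false_eq_true, if_false, List.map_id', ← hH, ← hW]
    set inter := PySem.Set.inter
        (PySem.Set.ofList ((pvZeros oldMap).flatMap
          (fun p => [(-1 : Int), 1].map (fun d => (p.1 + d, p.2)))))
        (PySem.Set.ofList ((pvZeros oldMap).flatMap
          (fun p => [(-1 : Int), 1].map (fun d => (p.1, p.2 + d)))))
      with hinter
    have hmem_inter : ∀ a b : Int, ((a, b) ∈ inter ↔
        ((pvIsOpen oldMap H W (a - 1) b = true ∨ pvIsOpen oldMap H W (a + 1) b = true)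
          ∧ (pvIsOpen oldMap H W a (b - 1) = true ∨ pvIsOpen oldMap H W a (b + 1) = true))) := by
      intro a b
      rw [hinter, PySem.Set.mem_inter, PySem.Set.mem_ofList, PySem.Set.mem_ofList]
      rw [mem_vert_iff, mem_horiz_iff, ← hH, ← hW]
    apply List.ext_getElem?
    intro i
    rw [hA i, hBdef, remfold_getElem?]
    cases hi : oldMap[i]? with
    | none =>
      have hge : oldMap.length ≤ i := by
        by_contra h
        exact absurd hi (by simp [List.getElem?_eq_getElem (by omega : i < oldMap.length)])
      have hnotin : ¬ ((i : Int) ∈ PySem.List.pyRange 0 H 1) := by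
        rw [PySem.List.mem_pyRange_one, hH]; omega
      simp [hnotin]
    | some row =>
      have hlt : i < oldMap.length := by
        by_contra h
        rw [List.getElem?_eq_none (by omega : oldMap.length ≤ i)] at hi
        simp at hi
      have hmemi : (i : Int) ∈ PySem.List.pyRange 0 H 1 := by
        rw [PySem.List.mem_pyRange_one, hH]; exact ⟨by omega, by omega⟩
      simp only [hmemi, if_true, Option.map_some]
      congr 1
      have hrow : oldMap.getD i [] = row := by
        rw [List.getD_eq_getElem?_getD, hi]; rfl
      apply List.ext_getElem?
      intro j
      rw [hF]
      rw [rowfold_getElem? _ (fun c hc => (PySem.List.mem_pyRange_one.mp hc).1) (g (i : Int)) row j]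
      rw [remrow_getElem?]
      cases hj : row[j]? with
      | none => simp
      | some v =>
        have hv : row.getD j 0 = v := by
          rw [List.getD_eq_getElem?_getD, hj]; rfl
        simp only [Option.map_some]
        -- the two removal conditions agree at cell (i, j)
        have hiff : ((j : Int) ∈ PySem.List.pyRange 0 W 1 ∧ g (i : Int) (j : Int) = true)
            ↔ (inter.any (fun p =>
                ((0 ≤ p.1 && p.1 < H) && (0 ≤ p.2 && p.2 < W)
                  && ((oldMap.getD p.1.toNat []).getD p.2.toNat 0 == 1)
                  && (p.1.toNat == i)) && (p.2.toNat == j)) = true) := by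
          rw [List.any_eq_true]
          constructor
          · rintro ⟨hjr, hgij⟩
            obtain ⟨hj0, hjW⟩ := PySem.List.mem_pyRange_one.mp hjr
            rw [hg, Bool.and_eq_true] at hgij
            obtain ⟨hcell, hadj⟩ := hgij
            rw [adjacentSpace_eq, ← hH, ← hW, Bool.and_eq_true] at hadj
            obtain ⟨hvert, hhoriz⟩ := hadj
            refine ⟨((i : Int), (j : Int)),
              (hmem_inter _ _).mpr ⟨Bool.or_eq_true_iff.mp hvert, Bool.or_eq_true_iff.mp hhoriz⟩, ?_⟩
            simp only [Bool.and_eq_true, decide_eq_true_eq, Int.toNat_natCast,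
              beq_self_eq_true, and_true]
            refine ⟨⟨⟨by omega, by omega⟩, ⟨by omega, hjW⟩⟩, ?_⟩
            simpa using hcell
          · rintro ⟨p, hp, hpred⟩
            simp only [Bool.and_eq_true, decide_eq_true_eq, beq_iff_eq] at hpred
            obtain ⟨⟨⟨⟨⟨hp1, hp2⟩, hp3, hp4⟩, hp5⟩, hpi⟩, hpj⟩ := hpred
            have hpi' : p.1 = (i : Int) := by omega
            have hpj' : p.2 = (j : Int) := by omega
            have hp' : ((i : Int), (j : Int)) ∈ inter := by
              rw [← hpi', ← hpj', Prod.mk.eta]; exact hp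
            obtain ⟨hvert, hhoriz⟩ := (hmem_inter _ _).mp hp'
            refine ⟨PySem.List.mem_pyRange_one.mpr ⟨by omega, by omega⟩, ?_⟩
            rw [hg, Bool.and_eq_true]
            constructor
            · rw [hpi', hpj'] at hp5
              simpa using hp5
            · rw [adjacentSpace_eq, ← hH, ← hW, Bool.and_eq_true]
              exact ⟨Bool.or_eq_true_iff.mpr hvert, Bool.or_eq_true_iff.mpr hhoriz⟩
        rw [if_congr hiff rfl rfl]
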